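-- pv_equiv track=rewrite | github.com/liyu10000/leetcode | array/#1961.py | isPrefixString
-- ===== SOURCE A (Python) =====
-- from typing import List
--
-- def isPrefixString(s: str, words: List[str]) -> bool:
--     i, n = 0, len(s)
--     for word in words:
--         if i == n:
--             return True
--         if len(word) > n - i:
--             return False
--         if word != s[i:i+len(word)]:
--             return False
--         i += len(word)
--     return i == n
-- ===== SOURCE B (Python) =====
-- def isPrefixString(s: str, words) -> bool:
--     if s == "":
--         return True
--     concat = ""
--     for w in words:
--         concat += w
--         if len(concat) > len(s):
--             return False
--         if len(concat) == len(s):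
--             return concat == s
--     return False
-- ===== Notes on version B (the rewrite author's own statement) =====
-- stated objective: simpler
-- what changed: B replaces A's tracked index with per-word slice comparisons by accumulating the concatenation and making a single string-equality decision when its length reaches len(s).
import Mathlib
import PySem

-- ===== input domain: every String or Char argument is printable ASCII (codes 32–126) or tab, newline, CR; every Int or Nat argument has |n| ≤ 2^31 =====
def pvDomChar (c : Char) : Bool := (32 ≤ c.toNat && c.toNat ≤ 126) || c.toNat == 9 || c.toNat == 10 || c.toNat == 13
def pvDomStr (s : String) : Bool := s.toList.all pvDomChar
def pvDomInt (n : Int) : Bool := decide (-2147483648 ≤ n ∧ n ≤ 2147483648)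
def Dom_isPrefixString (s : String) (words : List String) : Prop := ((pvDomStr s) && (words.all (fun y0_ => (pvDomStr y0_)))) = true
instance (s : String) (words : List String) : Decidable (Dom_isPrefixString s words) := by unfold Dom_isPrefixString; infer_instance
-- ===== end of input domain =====

-- B keeps the accumulated concatenation and decides with one bulk string equality at the
-- length boundary, instead of A's per-word slice comparisons against a tracked index (simpler).

-- ===== PORT A =====
-- loop of A: state i (Python int); n = len(s); early returns via the branch order of A
def agoA (sL : List Char) (n : Int) (i : Int) : List (List Char) → Bool
  | [] => i == n
  | w :: ws =>
    if i == n then true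
    else if (w.length : Int) > n - i then false
    else if w ≠ PySem.List.slice sL (some i) (some (i + (w.length : Int))) then false
    else agoA sL n (i + (w.length : Int)) ws

def isPrefixString (s : String) (words : List String) : Bool :=
  agoA s.toList (s.toList.length : Int) 0 (words.map String.toList)

-- ===== PORT B =====
-- loop of B: state = the accumulated concatenation
def bgoB (sL : List Char) (concat : List Char) : List (List Char) → Bool
  | [] => false
  | w :: ws =>
    let c := concat ++ w
    if c.length > sL.length then false
    else if c.length = sL.length then c == sL
    else bgoB sL c ws

def isPrefixString_alt (s : String) (words : List String) : Bool :=
  if s = "" then true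
  else bgoB s.toList [] (words.map String.toList)

-- ===== PRECONDITION & SPEC =====
def Spec_isPrefixString (s : String) (words : List String) (out : Bool) : Prop := out = isPrefixString_alt s words
instance (s : String) (words : List String) (out : Bool) : Decidable (Spec_isPrefixString s words out) := by unfold Spec_isPrefixString; infer_instance

-- ===== CLAIM (what is proved, stated in full; the proofs are below) =====
def Claim_equal_isPrefixString : Prop := ∀ (s : String) (words : List String), Dom_isPrefixString s words → Spec_isPrefixString s words (isPrefixString s words)

-- ===== LEMMAS AND PROOFS =====

-- once A's index reaches n, A returns true whatever words remain
theorem agoA_done (sL : List Char) (n : Int) (ws : List (List Char)) :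
    agoA sL n n ws = true := by
  cases ws with
  | nil => simp [agoA]
  | cons w ws => simp [agoA]

-- once the accumulated concatenation is not a prefix of s, B can only return false
theorem bgoB_bad (sL : List Char) : ∀ (ws : List (List Char)) (C : List Char),
    ¬ C <+: sL → bgoB sL C ws = false := by
  intro ws
  induction ws with
  | nil => intro C _; simp [bgoB]
  | cons w ws ih =>
    intro C hC
    have hc : ¬ (C ++ w) <+: sL := fun h => hC ((List.prefix_append C w).trans h)
    simp only [bgoB]
    split
    · rfl
    · split
      · -- equal length: C ++ w = sL would make C a prefix of sL
        simp only [beq_eq_false_iff_ne, ne_eq]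
        intro h; exact hc (h ▸ List.prefix_refl _)
      · exact ih _ hc

-- main invariant: while the processed words concatenate to a strict prefix C of s,
-- A's loop at index C.length computes the same value as B's loop at C
theorem good (sL : List Char) : ∀ (ws : List (List Char)) (C : List Char),
    C <+: sL → C.length < sL.length →
    agoA sL (sL.length : Int) (C.length : Int) ws = bgoB sL C ws := by
  intro ws
  induction ws with
  | nil =>
    intro C _ hlt
    simp only [agoA, bgoB]
    simp only [beq_eq_false_iff_ne, ne_eq, Int.natCast_inj]
    omega
  | cons w ws ih =>
    intro C hpre hlt
    have htake : sL.take C.length = C := (List.prefix_iff_eq_take.mp hpre).symm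
    have hslice : PySem.List.slice sL (some (C.length : Int))
        (some ((C.length : Int) + (w.length : Int))) = (sL.drop C.length).take w.length :=
      PySem.List.slice_natCast_add sL C.length w.length
    simp only [agoA, bgoB]
    have hne : ((C.length : Int) == (sL.length : Int)) = false := by
      simp only [beq_eq_false_iff_ne, ne_eq, Int.natCast_inj]; omega
    rw [hne]
    simp only [Bool.false_eq_true, if_false]
    by_cases hbig : (C ++ w).length > sL.length
    · have : ((w.length : Int) > (sL.length : Int) - (C.length : Int)) := by
        simp only [List.length_append] at hbig; omega
      rw [if_pos this, if_pos hbig]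
    · have h1 : ¬ ((w.length : Int) > (sL.length : Int) - (C.length : Int)) := by
        simp only [List.length_append] at hbig; omega
      rw [if_neg h1, if_neg hbig]
      have hlen : C.length + w.length ≤ sL.length := by
        simp only [List.length_append] at hbig; omega
      by_cases hm : w = (sL.drop C.length).take w.length
      · -- the word matches: C ++ w is again a prefix of s
        have hcpre : (C ++ w) = sL.take (C.length + w.length) := by
          rw [List.take_add, htake, ← hm]
        rw [if_neg (by rw [hslice]; exact not_not.mpr hm)]
        by_cases heq : (C ++ w).length = sL.length
        · rw [if_pos heq]
          have hl : C.length + w.length = sL.length := by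
            simpa using heq
          have hcs : (C ++ w) = sL := by
            rw [hcpre, hl, List.take_length]
          have hi : ((C.length : Int) + (w.length : Int)) = (sL.length : Int) := by
            omega
          rw [hi, agoA_done, hcs]
          simp
        · rw [if_neg heq]
          have hlt' : (C ++ w).length < sL.length := by
            simp only [List.length_append] at heq ⊢; omega
          have hpre' : (C ++ w) <+: sL := by
            rw [hcpre]; exact List.take_prefix _ _
          have := ih (C ++ w) hpre' hlt'
          rw [← this]
          congr 1
          simp only [List.length_append]; push_cast; ring
      · -- mismatch: A returns false now, B can never succeed from a non-prefix
        rw [if_pos (by rw [hslice]; simpa using hm)]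
        have hnp : ¬ (C ++ w) <+: sL := by
          intro h
          have hsplit : sL = C ++ sL.drop C.length := by
            conv_lhs => rw [← List.take_append_drop C.length sL]
            rw [htake]
          rw [hsplit] at h
          exact hm (List.prefix_iff_eq_take.mp ((List.prefix_append_right_inj C).mp h))
        by_cases heq : (C ++ w).length = sL.length
        · rw [if_pos heq]
          have hne' : (C ++ w) ≠ sL := fun h => hnp (h ▸ List.prefix_refl _)
          exact (beq_eq_false_iff_ne.mpr hne').symm
        · rw [if_neg heq]
          rw [bgoB_bad sL ws (C ++ w) hnp]

-- ===== VERDICT (by name: the statement is the Claim_ definition above) =====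
theorem isPrefixString_spec : Claim_equal_isPrefixString := by
  intro s words _
  unfold Spec_isPrefixString isPrefixString isPrefixString_alt
  by_cases hs : s = ""
  · subst hs
    cases words.map String.toList with
    | nil => simp [agoA]
    | cons w ws => simp [agoA]
  · rw [if_neg hs]
    have hne : s.toList ≠ [] := fun h => hs (by
      have := congrArg String.ofList h
      simpa using this)
    have hlt : (0:Nat) < s.toList.length := List.length_pos_iff.mpr hne
    have := good s.toList (words.map String.toList) [] (List.nil_prefix) (by simpa using hlt)
    simpa using this
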